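-- pv_equiv track=rewrite | github.com/ls1intum/edutelligence | logos/src/logos/sdi/models.py | warmest_state
-- ===== SOURCE A (Python) =====
-- from typing import Any, Dict, Optional, List
--
-- _STATE_WARMTH_ORDER = ["running", "loaded", "sleeping", "starting", "cold", "stopped", "error"]
--
-- def warmest_state(states: List[str]) -> str:
--     """Return the warmest runtime_state from a list, using _STATE_WARMTH_ORDER."""
--     if not states:
--         return "error"
--     best_idx = len(_STATE_WARMTH_ORDER)
--     best = "error"
--     for s in states:
--         try:
--             idx = _STATE_WARMTH_ORDER.index(s)
--         except ValueError:
--             idx = len(_STATE_WARMTH_ORDER)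
--         if idx < best_idx:
--             best_idx = idx
--             best = s
--     return best
-- ===== SOURCE B (Python) =====
-- _STATE_WARMTH_ORDER = ["running", "loaded", "sleeping", "starting", "cold", "stopped", "error"]
--
-- def warmest_state(states):
--     """Return the warmest runtime_state from a list, using _STATE_WARMTH_ORDER."""
--     present = set(states)
--     for w in _STATE_WARMTH_ORDER:
--         if w in present:
--             return w
--     return "error"
-- ===== Notes on version B (the rewrite author's own statement) =====
-- stated objective: simpler
-- what changed: Instead of scanning states while maintaining a best index computed by repeated list.index, B builds a set of the input states once and scans the fixed 7-element priority list, returning the first priority present.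
import Mathlib
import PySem

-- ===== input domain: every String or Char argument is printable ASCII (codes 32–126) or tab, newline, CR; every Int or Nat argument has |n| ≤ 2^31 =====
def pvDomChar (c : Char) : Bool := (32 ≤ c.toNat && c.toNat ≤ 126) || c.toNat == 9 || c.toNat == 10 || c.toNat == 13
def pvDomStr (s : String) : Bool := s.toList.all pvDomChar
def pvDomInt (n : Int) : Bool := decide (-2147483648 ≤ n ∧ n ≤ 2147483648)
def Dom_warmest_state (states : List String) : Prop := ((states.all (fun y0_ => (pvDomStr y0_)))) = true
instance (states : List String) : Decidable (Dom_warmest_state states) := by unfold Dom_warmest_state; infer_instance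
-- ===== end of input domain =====

-- B builds a set of the input states once and scans the fixed priority list instead of
-- scanning states while maintaining a best index computed by list.index (objective: simpler).

-- ===== PORT A =====
-- the shared module constant _STATE_WARMTH_ORDER
def pvOrder : List String := ["running", "loaded", "sleeping", "starting", "cold", "stopped", "error"]

-- the try/except around _STATE_WARMTH_ORDER.index(s): ValueError -> len(_STATE_WARMTH_ORDER)
def pvIdx (s : String) : Nat :=
  match PySem.List.index? pvOrder s with
  | some i => i
  | none => pvOrder.length

-- the body of A's for-loop over `states`, state = (best_idx, best)
def pvStep (acc : Nat × String) (s : String) : Nat × String :=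
  let idx := pvIdx s
  if idx < acc.1 then (idx, s) else acc

def warmest_state (states : List String) : String :=
  if states = [] then "error"
  else (states.foldl pvStep (pvOrder.length, "error")).2

-- ===== PORT B =====
-- B's for-loop over _STATE_WARMTH_ORDER with early return; falls through to "error"
def pvFindWarm (present : PySem.Set String) : List String → String
  | [] => "error"
  | w :: rest => if PySem.Set.contains present w then w else pvFindWarm present rest

def warmest_state_alt (states : List String) : String :=
  pvFindWarm (PySem.Set.ofList states) pvOrder

-- ===== PRECONDITION & SPEC =====
def Spec_warmest_state (states : List String) (out : String) : Prop := out = warmest_state_alt states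
instance (states : List String) (out : String) : Decidable (Spec_warmest_state states out) := by unfold Spec_warmest_state; infer_instance

-- ===== CLAIM (what is proved, stated in full; the proofs are below) =====
def Claim_equal_warmest_state : Prop := ∀ (states : List String), Dom_warmest_state states → Spec_warmest_state states (warmest_state states)

-- ===== LEMMAS AND PROOFS =====

-- running minimum of pvIdx over xs, started at bi
def pvMfold (xs : List String) (bi : Nat) : Nat :=
  xs.foldl (fun a s => if pvIdx s < a then pvIdx s else a) bi

theorem pvIdx_le (s : String) : pvIdx s ≤ 7 := by
  unfold pvIdx
  cases h : PySem.List.index? pvOrder s with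
  | none => simp [pvOrder]
  | some i =>
    obtain ⟨hk, _, _⟩ := PySem.List.getElem_of_index?_eq_some h
    have h7 : pvOrder.length = 7 := rfl
    simp only
    omega

theorem pvIdx_lt_get (s : String) (h : pvIdx s < 7) : pvOrder[pvIdx s]! = s := by
  cases hi : PySem.List.index? pvOrder s with
  | none => exfalso; unfold pvIdx at h; rw [hi] at h; simp [pvOrder] at h
  | some i =>
    obtain ⟨hk, hv, _⟩ := PySem.List.getElem_of_index?_eq_some hi
    have he : pvIdx s = i := by unfold pvIdx; rw [hi]
    rw [he, getElem!_pos pvOrder i hk]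
    exact hv

theorem pvMfold_le_init (xs : List String) : ∀ bi, pvMfold xs bi ≤ bi := by
  induction xs with
  | nil => intro bi; simp [pvMfold]
  | cons x xs ih =>
    intro bi
    simp only [pvMfold, List.foldl_cons]
    by_cases h : pvIdx x < bi
    · rw [if_pos h]
      have := ih (pvIdx x)
      simp only [pvMfold] at this
      omega
    · rw [if_neg h]
      have := ih bi
      simp only [pvMfold] at this
      exact this

theorem pvMfold_le_of_mem (xs : List String) : ∀ bi s, s ∈ xs → pvMfold xs bi ≤ pvIdx s := by
  induction xs with
  | nil => intro _ _ h; simp at h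
  | cons x xs ih =>
    intro bi s hs
    simp only [pvMfold, List.foldl_cons]
    rcases List.mem_cons.mp hs with h | h
    · subst h
      by_cases hlt : pvIdx s < bi
      · rw [if_pos hlt]
        have := pvMfold_le_init xs (pvIdx s)
        simp only [pvMfold] at this
        exact this
      · rw [if_neg hlt]
        have := pvMfold_le_init xs bi
        simp only [pvMfold] at this
        omega
    · by_cases hlt : pvIdx x < bi
      · rw [if_pos hlt]
        have := ih (pvIdx x) s h
        simp only [pvMfold] at this
        exact this
      · rw [if_neg hlt]
        have := ih bi s h
        simp only [pvMfold] at this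
        exact this

theorem pvMfold_lt_mem (xs : List String) :
    ∀ bi, pvMfold xs bi < bi → ∃ s ∈ xs, pvIdx s = pvMfold xs bi := by
  induction xs with
  | nil => intro bi h; simp [pvMfold] at h
  | cons x xs ih =>
    intro bi h
    simp only [pvMfold, List.foldl_cons] at h ⊢
    by_cases hx : pvIdx x < bi
    · rw [if_pos hx] at h ⊢
      by_cases hlt : pvMfold xs (pvIdx x) < pvIdx x
      · have hlt' := hlt
        simp only [pvMfold] at hlt'
        obtain ⟨s, hs, he⟩ := ih (pvIdx x) hlt'
        simp only [pvMfold] at he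
        exact ⟨s, List.mem_cons_of_mem _ hs, he⟩
      · have hle := pvMfold_le_init xs (pvIdx x)
        simp only [pvMfold] at hle hlt
        exact ⟨x, List.mem_cons_self, by omega⟩
    · rw [if_neg hx] at h ⊢
      obtain ⟨s, hs, he⟩ := ih bi (by simp only [pvMfold]; exact h)
      simp only [pvMfold] at he
      exact ⟨s, List.mem_cons_of_mem _ hs, he⟩

theorem pvFoldA (xs : List String) : ∀ (bi : Nat) (b : String), bi ≤ 7 →
    xs.foldl pvStep (bi, b) =
      (pvMfold xs bi, if pvMfold xs bi < bi then pvOrder[pvMfold xs bi]! else b) := by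
  induction xs with
  | nil => intro bi b _; simp [pvMfold]
  | cons x xs ih =>
    intro bi b hbi
    simp only [List.foldl_cons, pvStep, pvMfold]
    by_cases h : pvIdx x < bi
    · rw [if_pos h, if_pos h]
      rw [ih (pvIdx x) x (pvIdx_le x)]
      have hM := pvMfold_le_init xs (pvIdx x)
      simp only [pvMfold] at hM ⊢
      by_cases hlt : List.foldl (fun a s => if pvIdx s < a then pvIdx s else a) (pvIdx x) xs < pvIdx x
      · rw [if_pos hlt, if_pos (by omega)]
      · have heq : List.foldl (fun a s => if pvIdx s < a then pvIdx s else a) (pvIdx x) xs = pvIdx x := by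
          omega
        rw [if_neg hlt, if_pos (by omega), heq, pvIdx_lt_get x (by omega)]
    · rw [if_neg h, if_neg h]
      have := ih bi b hbi
      simp only [pvMfold] at this
      exact this

-- lower bound for the running minimum from absent prefix elements of pvOrder
theorem pvLB (states : List String) (k : Nat) (hk : k ≤ 7)
    (h : ∀ j, j < k → pvOrder[j]! ∉ states) : k ≤ pvMfold states 7 := by
  rcases Nat.lt_or_ge (pvMfold states 7) k with hlt | hge
  swap
  · exact hge
  exfalso
  have hm7 : pvMfold states 7 < 7 := by omega
  obtain ⟨s, hs, hidx⟩ := pvMfold_lt_mem states 7 hm7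
  have hget : pvOrder[pvIdx s]! = s := pvIdx_lt_get s (by omega)
  exact h (pvMfold states 7) hlt (by rw [← hidx, hget]; exact hs)

theorem pvIdx_c0 : pvIdx "running" = 0 := by decide
theorem pvIdx_c1 : pvIdx "loaded" = 1 := by decide
theorem pvIdx_c2 : pvIdx "sleeping" = 2 := by decide
theorem pvIdx_c3 : pvIdx "starting" = 3 := by decide
theorem pvIdx_c4 : pvIdx "cold" = 4 := by decide
theorem pvIdx_c5 : pvIdx "stopped" = 5 := by decide
theorem pvIdx_c6 : pvIdx "error" = 6 := by decide

theorem pvB_char (states : List String) :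
    warmest_state_alt states =
      (if pvMfold states 7 < 7 then pvOrder[pvMfold states 7]! else "error") := by
  have hle := pvMfold_le_init states 7
  by_cases c0 : "running" ∈ states
  · have hm : pvMfold states 7 = 0 := by
      have := pvMfold_le_of_mem states 7 _ c0; rw [pvIdx_c0] at this; omega
    simp [warmest_state_alt, pvFindWarm, pvOrder, c0, hm]
  by_cases c1 : "loaded" ∈ states
  · have hm : pvMfold states 7 = 1 := by
      have hu := pvMfold_le_of_mem states 7 _ c1; rw [pvIdx_c1] at hu
      have hl := pvLB states 1 (by omega) (by intro j hj; interval_cases j; simpa [pvOrder] using c0)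
      omega
    simp [warmest_state_alt, pvFindWarm, pvOrder, c0, c1, hm]
  by_cases c2 : "sleeping" ∈ states
  · have hm : pvMfold states 7 = 2 := by
      have hu := pvMfold_le_of_mem states 7 _ c2; rw [pvIdx_c2] at hu
      have hl := pvLB states 2 (by omega) (by
        intro j hj; interval_cases j
        · simpa [pvOrder] using c0
        · simpa [pvOrder] using c1)
      omega
    simp [warmest_state_alt, pvFindWarm, pvOrder, c0, c1, c2, hm]
  by_cases c3 : "starting" ∈ states
  · have hm : pvMfold states 7 = 3 := by
      have hu := pvMfold_le_of_mem states 7 _ c3; rw [pvIdx_c3] at hu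
      have hl := pvLB states 3 (by omega) (by
        intro j hj; interval_cases j
        · simpa [pvOrder] using c0
        · simpa [pvOrder] using c1
        · simpa [pvOrder] using c2)
      omega
    simp [warmest_state_alt, pvFindWarm, pvOrder, c0, c1, c2, c3, hm]
  by_cases c4 : "cold" ∈ states
  · have hm : pvMfold states 7 = 4 := by
      have hu := pvMfold_le_of_mem states 7 _ c4; rw [pvIdx_c4] at hu
      have hl := pvLB states 4 (by omega) (by
        intro j hj; interval_cases j
        · simpa [pvOrder] using c0
        · simpa [pvOrder] using c1
        · simpa [pvOrder] using c2
        · simpa [pvOrder] using c3)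
      omega
    simp [warmest_state_alt, pvFindWarm, pvOrder, c0, c1, c2, c3, c4, hm]
  by_cases c5 : "stopped" ∈ states
  · have hm : pvMfold states 7 = 5 := by
      have hu := pvMfold_le_of_mem states 7 _ c5; rw [pvIdx_c5] at hu
      have hl := pvLB states 5 (by omega) (by
        intro j hj; interval_cases j
        · simpa [pvOrder] using c0
        · simpa [pvOrder] using c1
        · simpa [pvOrder] using c2
        · simpa [pvOrder] using c3
        · simpa [pvOrder] using c4)
      omega
    simp [warmest_state_alt, pvFindWarm, pvOrder, c0, c1, c2, c3, c4, c5, hm]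
  by_cases c6 : "error" ∈ states
  · have hm : pvMfold states 7 = 6 := by
      have hu := pvMfold_le_of_mem states 7 _ c6; rw [pvIdx_c6] at hu
      have hl := pvLB states 6 (by omega) (by
        intro j hj; interval_cases j
        · simpa [pvOrder] using c0
        · simpa [pvOrder] using c1
        · simpa [pvOrder] using c2
        · simpa [pvOrder] using c3
        · simpa [pvOrder] using c4
        · simpa [pvOrder] using c5)
      omega
    simp [warmest_state_alt, pvFindWarm, pvOrder, c0, c1, c2, c3, c4, c5, c6, hm]
  · have hm : pvMfold states 7 = 7 := by
      have hl := pvLB states 7 (by omega) (by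
        intro j hj; interval_cases j
        · simpa [pvOrder] using c0
        · simpa [pvOrder] using c1
        · simpa [pvOrder] using c2
        · simpa [pvOrder] using c3
        · simpa [pvOrder] using c4
        · simpa [pvOrder] using c5
        · simpa [pvOrder] using c6)
      omega
    simp [warmest_state_alt, pvFindWarm, pvOrder, c0, c1, c2, c3, c4, c5, c6, hm]

-- ===== VERDICT (by name: the statement is the Claim_ definition above) =====
theorem warmest_state_spec : Claim_equal_warmest_state := by
  intro states _
  unfold Spec_warmest_state
  rw [pvB_char]
  unfold warmest_state
  by_cases hnil : states = []
  · subst hnil; simp [pvMfold]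
  · rw [if_neg hnil]
    have h7 : pvOrder.length = 7 := rfl
    rw [h7, pvFoldA states 7 "error" (by omega)]
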